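-- pv_equiv track=rewrite | github.com/dukcode/ssafy-12th-gumi-02-algorithm-study | dukcode/swea/s6190.py | is_progressive
-- ===== SOURCE A (Python) =====
-- def is_progressive(num):
--     digit = 10
--     while num != 0:
--         if digit < (num % 10):
--             return False
--         digit = num % 10
--         num //= 10
--     return True
-- ===== SOURCE B (Python) =====
-- def is_progressive(num):
--     s = str(num)
--     return s == ''.join(sorted(s))
-- ===== Notes on version B (the rewrite author's own statement) =====
-- stated objective: simpler
-- what changed: Replaces the right-to-left arithmetic digit-extraction loop with a build-sorted-copy-and-compare over the decimal string: the digits are non-decreasing iff the string equals its sorted copy.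
-- outside the precondition, e.g. on is_progressive(-3): A returns False, B returns True; on is_progressive(-1): A does not finish within the time limit, B returns True
import Mathlib
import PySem

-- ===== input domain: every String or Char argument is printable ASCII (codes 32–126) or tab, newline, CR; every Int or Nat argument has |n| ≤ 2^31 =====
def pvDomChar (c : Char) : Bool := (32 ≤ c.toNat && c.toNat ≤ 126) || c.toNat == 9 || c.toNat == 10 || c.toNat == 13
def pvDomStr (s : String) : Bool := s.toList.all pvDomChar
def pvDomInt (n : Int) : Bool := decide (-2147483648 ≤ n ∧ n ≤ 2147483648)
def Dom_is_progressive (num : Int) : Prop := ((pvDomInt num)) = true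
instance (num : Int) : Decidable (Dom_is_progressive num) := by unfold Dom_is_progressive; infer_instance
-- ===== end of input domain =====

-- B tests the digits are non-decreasing by comparing the decimal string with its sorted copy,
-- instead of A's right-to-left arithmetic digit-extraction loop (objective: simpler).
-- Pre_ excludes negative num, a corner outside the digit-progression task's natural domain: there A's floor-mod arithmetic yields False (and at num = -1 it never terminates), while B's string test sees the '-' sign and neither value is the specified one.

-- ===== PORT A =====
-- fuel = num.natAbs + 1 bounds the loop's iterations; each step is A's loop body verbatim.
def pvLoopA : Nat → Int → Int → Bool
  | 0, _, _ => true
  | fuel+1, num, digit =>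
    if num ≠ 0 then
      if digit < PySem.Int.mod num 10 then false
      else pvLoopA fuel (PySem.Int.floordiv num 10) (PySem.Int.mod num 10)
    else true

def is_progressive (num : Int) : Bool := pvLoopA (num.natAbs + 1) num 10

-- ===== PORT B =====
def is_progressive_alt (num : Int) : Bool :=
  let s := PySem.Int.toStr num
  decide (s = String.ofList (PySem.List.sorted s.toList (fun c => c) false))

-- ===== PRECONDITION & SPEC =====
-- Pre_ excludes negative num (see the sentence in the header comment above).
def Pre_is_progressive (num : Int) : Prop := 0 ≤ num
instance (num : Int) : Decidable (Pre_is_progressive num) := by unfold Pre_is_progressive; infer_instance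
def pvWitness_is_progressive : Int := (123)

def Spec_is_progressive (num : Int) (out : Bool) : Prop := out = is_progressive_alt num
instance (num : Int) (out : Bool) : Decidable (Spec_is_progressive num out) := by unfold Spec_is_progressive; infer_instance

-- ===== CLAIM (what is proved, stated in full; the proofs are below) =====
def Claim_equal_is_progressive : Prop := ∀ (num : Int), Dom_is_progressive num → Pre_is_progressive num → Spec_is_progressive num (is_progressive num)

-- ===== LEMMAS AND PROOFS =====

-- little-endian decimal digit values of a natural number
def pvDigs (n : Nat) : List Nat :=
  if h : n = 0 then [] else n % 10 :: pvDigs (n / 10)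
  decreasing_by exact Nat.div_lt_self (Nat.pos_of_ne_zero h) (by norm_num)

theorem pvDigs_zero : pvDigs 0 = [] := by rw [pvDigs]; simp

theorem pvDigs_pos {n : Nat} (h : n ≠ 0) : pvDigs n = n % 10 :: pvDigs (n / 10) := by
  rw [pvDigs]; simp [h]

theorem mem_pvDigs {n x : Nat} (hx : x ∈ pvDigs n) : x < 10 := by
  induction n using Nat.strong_induction_on with
  | _ n ih =>
    by_cases h : n = 0
    · subst h; rw [pvDigs_zero] at hx; simp at hx
    · rw [pvDigs_pos h] at hx
      rcases List.mem_cons.mp hx with h1 | h1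
      · subst h1; exact Nat.mod_lt _ (by norm_num)
      · exact ih (n / 10) (Nat.div_lt_self (Nat.pos_of_ne_zero h) (by norm_num)) h1

-- A's loop on naturals
def pvNatLoop (n d : Nat) : Bool :=
  if h : n = 0 then true
  else if d < n % 10 then false else pvNatLoop (n / 10) (n % 10)
  decreasing_by exact Nat.div_lt_self (Nat.pos_of_ne_zero h) (by norm_num)

theorem pvIntMod_cast (n : Nat) : PySem.Int.mod (n : Int) 10 = ((n % 10 : Nat) : Int) := by
  simp [PySem.Int.mod, Int.fmod_eq_emod]

theorem pvIntDiv_cast (n : Nat) : PySem.Int.floordiv (n : Int) 10 = ((n / 10 : Nat) : Int) := by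
  simp [PySem.Int.floordiv, Int.fdiv_eq_ediv]

theorem pvLoopA_eq_natLoop : ∀ (fuel : Nat) (n d : Nat), n < fuel →
    pvLoopA fuel (n : Int) (d : Int) = pvNatLoop n d := by
  intro fuel
  induction fuel with
  | zero => intro n d h; omega
  | succ f ih =>
    intro n d h
    rw [pvNatLoop]
    by_cases hn : n = 0
    · subst hn; simp [pvLoopA]
    · have hne : (n : Int) ≠ 0 := by exact_mod_cast hn
      have hlt : n / 10 < n := Nat.div_lt_self (Nat.pos_of_ne_zero hn) (by norm_num)
      show (if (n : Int) ≠ 0 then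
              if (d : Int) < PySem.Int.mod (n : Int) 10 then false
              else pvLoopA f (PySem.Int.floordiv (n : Int) 10) (PySem.Int.mod (n : Int) 10)
            else true) = _
      rw [if_pos hne, pvIntMod_cast, pvIntDiv_cast, dif_neg hn]
      have hcmp : ((d : Int) < ((n % 10 : Nat) : Int)) ↔ (d < n % 10) := by exact_mod_cast Iff.rfl
      by_cases hd : d < n % 10
      · rw [if_pos (hcmp.mpr hd), if_pos hd]
      · rw [if_neg (fun hc => hd (hcmp.mp hc)), if_neg hd]
        exact ih (n / 10) (n % 10) (by omega)

theorem pvNatLoop_eq_chain : ∀ (n d : Nat),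
    pvNatLoop n d = true ↔ List.IsChain (fun a b => b ≤ a) (d :: pvDigs n) := by
  intro n
  induction n using Nat.strong_induction_on with
  | _ n ih =>
    intro d
    by_cases hn : n = 0
    · subst hn
      rw [pvNatLoop, pvDigs_zero]
      simp
    · rw [pvNatLoop, dif_neg hn, pvDigs_pos hn, List.isChain_cons_cons]
      by_cases hd : d < n % 10
      · simp [hd]
      · rw [if_neg hd]
        rw [ih (n / 10) (Nat.div_lt_self (Nat.pos_of_ne_zero hn) (by norm_num)) (n % 10)]
        simp [Nat.le_of_not_lt hd]

theorem toDigitsCore_eq : ∀ (fuel n : Nat) (acc : List Char), n ≠ 0 → n ≤ fuel →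
    Nat.toDigitsCore 10 fuel n acc = ((pvDigs n).map Nat.digitChar).reverse ++ acc := by
  intro fuel
  induction fuel with
  | zero => intro n acc hn hf; omega
  | succ f ih =>
    intro n acc hn hf
    rw [pvDigs_pos hn]
    by_cases h0 : n / 10 = 0
    · simp [Nat.toDigitsCore, h0, pvDigs_zero]
    · have hlt : n / 10 < n := Nat.div_lt_self (Nat.pos_of_ne_zero hn) (by norm_num)
      have h1 : n / 10 ≤ f := by omega
      simp only [Nat.toDigitsCore, h0, if_false]
      rw [ih (n / 10) (Nat.digitChar (n % 10) :: acc) h0 h1]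
      simp

theorem digitChar_le_iff {a b : Nat} (ha : a < 10) (hb : b < 10) :
    (Nat.digitChar a ≤ Nat.digitChar b) ↔ a ≤ b := by
  interval_cases a <;> interval_cases b <;> decide

theorem sorted_self_iff_pairwise (cs : List Char) :
    (cs = PySem.List.sorted cs (fun c => c) false) ↔ cs.Pairwise (· ≤ ·) := by
  constructor
  · intro h
    have := PySem.List.sorted_pairwise cs (fun c => c)
    rw [← h] at this
    exact this
  · intro h
    exact (PySem.List.sorted_eq_self_of_pairwise cs (fun c => c) h).symm

theorem chain_cons_ten (n : Nat) :
    List.IsChain (fun a b => b ≤ a) ((10 : Nat) :: pvDigs n) ↔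
      List.IsChain (fun a b => b ≤ a) (pvDigs n) := by
  cases hL : pvDigs n with
  | nil => simp
  | cons x t =>
    rw [List.isChain_cons_cons]
    have hx : x < 10 := mem_pvDigs (n := n) (by rw [hL]; exact List.mem_cons_self)
    simp [Nat.le_of_lt hx]

-- ===== VERDICT (by name: the statement is the Claim_ definition above) =====
theorem is_progressive_spec : Claim_equal_is_progressive := by
  intro num _ hpre
  unfold Spec_is_progressive
  obtain ⟨n, rfl⟩ : ∃ n : Nat, num = (n : Int) := ⟨num.toNat, (Int.toNat_of_nonneg hpre).symm⟩
  by_cases hn : n = 0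
  · subst hn; decide
  · rw [Bool.eq_iff_iff]
    -- A side
    have hA : is_progressive (n : Int) = pvNatLoop n 10 := by
      have h10 : ((10 : Nat) : Int) = (10 : Int) := by norm_num
      rw [is_progressive, show ((n : Int)).natAbs = n by simp, ← h10]
      exact pvLoopA_eq_natLoop (n + 1) n 10 (Nat.lt_succ_self n)
    -- B side: the decimal char list
    have hcs : (PySem.Int.toStr (n : Int)).toList = ((pvDigs n).map Nat.digitChar).reverse := by
      rw [PySem.Int.toList_toStr]
      unfold PySem.Int.toChars
      rw [if_neg (by exact_mod_cast Int.not_lt.mpr (Int.natCast_nonneg n)),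
        show ((n : Int)).toNat = n by simp, Nat.toDigits,
        toDigitsCore_eq (n + 1) n [] hn (Nat.le_succ n)]
      simp
    have hB : (is_progressive_alt (n : Int) = true) ↔
        ((PySem.Int.toStr (n : Int)).toList).Pairwise (· ≤ ·) := by
      unfold is_progressive_alt
      simp only [decide_eq_true_eq]
      rw [← sorted_self_iff_pairwise]
      constructor
      · intro h
        rw [← String.toList_inj] at h
        simpa using h
      · intro h
        rw [← String.toList_inj]
        simpa using h
    rw [hA, hB, hcs, List.pairwise_reverse, List.pairwise_map,
      List.Pairwise.iff_of_mem (S := fun a b => b ≤ a)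
        (fun ha hb => digitChar_le_iff (mem_pvDigs hb) (mem_pvDigs ha)),
      pvNatLoop_eq_chain n 10, chain_cons_ten]
    exact @List.isChain_iff_pairwise _ _ _ ⟨fun h1 h2 => Nat.le_trans h2 h1⟩
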